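-- pv_equiv track=rewrite | github.com/shukla284/ProgrammingCodes | maxContigousSum.py | getEndMaximaPoints
-- ===== SOURCE A (Python) =====
-- def getEndMaximaPoints(numbers):
--     sumHere,sumSoFar,count=0,0,0
--     start,end=0,0
--     for number in numbers:
--         sumHere=sumHere+number
--         if sumHere<0:
--             sumHere,elements=0,0
--             start+=1
--         if sumSoFar<sumHere:
--             (sumSoFar,end)=(sumHere,count)
--         count+=1
--     return (start,end)
-- ===== SOURCE B (Python) =====
-- def getEndMaximaPoints(numbers):
--     # pass 1: build the post-reset running-sum table and count resets
--     vals = []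
--     s = 0
--     start = 0
--     for x in numbers:
--         s += x
--         if s < 0:
--             s = 0
--             start += 1
--         vals.append(s)
--     # pass 2: end = first index of the maximum, only if that maximum is > 0
--     end = 0
--     if vals:
--         m = max(vals)
--         if m > 0:
--             end = vals.index(m)
--     return (start, end)
-- ===== Notes on version B (the rewrite author's own statement) =====
-- stated objective: alternative
-- what changed: A's single interleaved Kadane loop (running sum, running max and endpoint all updated together) is replaced by a table-build pass producing the post-reset running sums followed by a separate max / first-index-of-max scan.
import Mathlib
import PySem

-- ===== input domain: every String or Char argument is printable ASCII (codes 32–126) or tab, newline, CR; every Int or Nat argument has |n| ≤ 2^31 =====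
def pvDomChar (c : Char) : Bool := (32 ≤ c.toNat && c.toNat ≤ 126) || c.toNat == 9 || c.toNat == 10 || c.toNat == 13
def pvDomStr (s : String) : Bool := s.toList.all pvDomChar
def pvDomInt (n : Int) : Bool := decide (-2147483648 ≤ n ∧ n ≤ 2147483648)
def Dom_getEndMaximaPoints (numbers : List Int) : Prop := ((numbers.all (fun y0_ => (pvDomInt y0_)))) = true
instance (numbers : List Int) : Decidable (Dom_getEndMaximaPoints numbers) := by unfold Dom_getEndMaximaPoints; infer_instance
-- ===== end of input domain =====

-- B replaces A's interleaved Kadane loop by a table-build pass plus a separate max/argmax scan (alternative decomposition, same cost).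


-- ===== PORT A =====
-- state: (sumHere, sumSoFar, count, start, end)
def getEndMaximaPoints (numbers : List Int) : Int × Int :=
  let st := numbers.foldl
    (fun (st : Int × Int × Int × Int × Int) number =>
      let (sumHere, sumSoFar, count, start, e) := st
      let sumHere := sumHere + number
      let (sumHere, start) := if sumHere < 0 then ((0 : Int), start + 1) else (sumHere, start)
      let (sumSoFar, e) := if sumSoFar < sumHere then (sumHere, count) else (sumSoFar, e)
      (sumHere, sumSoFar, count + 1, start, e))
    (0, 0, 0, 0, 0)
  (st.2.2.2.1, st.2.2.2.2)

-- ===== PORT B =====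
-- pass 1 state: (vals, s, start)
def getEndMaximaPoints_alt (numbers : List Int) : Int × Int :=
  let p := numbers.foldl
    (fun (acc : List Int × Int × Int) x =>
      let (vals, s, start) := acc
      let s := s + x
      let (s, start) := if s < 0 then ((0 : Int), start + 1) else (s, start)
      (vals ++ [s], s, start))
    ([], 0, 0)
  let vals := p.1
  let start := p.2.2
  let e : Int :=
    match PySem.List.max? vals (fun y => y) with
    | none => 0
    | some m =>
      if m > 0 then
        match PySem.List.index? vals m with
        | some i => (i : Int)
        | none => 0
      else 0
  (start, e)

-- ===== PRECONDITION & SPEC =====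
def Spec_getEndMaximaPoints (numbers : List Int) (out : Int × Int) : Prop := out = getEndMaximaPoints_alt numbers
instance (numbers : List Int) (out : Int × Int) : Decidable (Spec_getEndMaximaPoints numbers out) := by unfold Spec_getEndMaximaPoints; infer_instance

-- ===== CLAIM (what is proved, stated in full; the proofs are below) =====
def Claim_equal_getEndMaximaPoints : Prop := ∀ (numbers : List Int), Dom_getEndMaximaPoints numbers → Spec_getEndMaximaPoints numbers (getEndMaximaPoints numbers)

-- ===== LEMMAS AND PROOFS =====

-- the table of post-reset running sums, and the reset count, as recursions
def pvBuild (l : List Int) (s : Int) : List Int :=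
  match l with
  | [] => []
  | x :: t => let s' := if s + x < 0 then 0 else s + x; s' :: pvBuild t s'

def pvResets (l : List Int) (s : Int) : Int :=
  match l with
  | [] => 0
  | x :: t => (if s + x < 0 then 1 else 0) + pvResets t (if s + x < 0 then 0 else s + x)

-- B's second pass, generalized to a running (best, index) scan starting at index `count`
def pvArgmax (vals : List Int) (sofar e count : Int) : Int × Int :=
  match vals with
  | [] => (sofar, e)
  | v :: t => if sofar < v then pvArgmax t v count (count + 1) else pvArgmax t sofar e (count + 1)

theorem pvA_foldl_eq (l : List Int) (h sofar count start e : Int) :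
    l.foldl
      (fun (st : Int × Int × Int × Int × Int) number =>
        let (sumHere, sumSoFar, count, start, e) := st
        let sumHere := sumHere + number
        let (sumHere, start) := if sumHere < 0 then ((0 : Int), start + 1) else (sumHere, start)
        let (sumSoFar, e) := if sumSoFar < sumHere then (sumHere, count) else (sumSoFar, e)
        (sumHere, sumSoFar, count + 1, start, e))
      (h, sofar, count, start, e)
    = (let q := pvArgmax (pvBuild l h) sofar e count
       ((pvBuild l h).getLastD h, q.1, count + l.length, start + pvResets l h, q.2)) := by
  induction l generalizing h sofar count start e with
  | nil => simp [pvBuild, pvResets, pvArgmax]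
  | cons x t ih =>
    simp only [List.foldl_cons, pvBuild, pvResets]
    by_cases hneg : h + x < 0 <;> by_cases hup : sofar < (if h + x < 0 then (0:Int) else h + x) <;>
      simp only [hneg, ite_true, ite_false] at hup ⊢ <;>
      rw [ih] <;>
      simp only [pvArgmax, hup, ite_true, ite_false, List.getLastD_cons, List.length_cons,
        Prod.mk.injEq, Nat.cast_add, Nat.cast_one] <;>
      and_intros <;> first | trivial | omega

theorem pvB_foldl_eq (l : List Int) (acc : List Int) (s start : Int) :
    l.foldl
      (fun (acc : List Int × Int × Int) x =>
        let (vals, s, start) := acc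
        let s := s + x
        let (s, start) := if s < 0 then ((0 : Int), start + 1) else (s, start)
        (vals ++ [s], s, start))
      (acc, s, start)
    = (acc ++ pvBuild l s, (pvBuild l s).getLastD s, start + pvResets l s) := by
  induction l generalizing acc s start with
  | nil => simp [pvBuild, pvResets]
  | cons x t ih =>
    simp only [List.foldl_cons, pvBuild, pvResets]
    by_cases hneg : s + x < 0 <;>
      simp only [hneg, ite_true, ite_false] <;>
      rw [ih] <;>
      simp only [List.getLastD_cons, List.append_assoc, List.singleton_append,
        Prod.mk.injEq] <;>
      and_intros <;> first | trivial | omega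

-- running max with a moved seed
theorem pvFoldlMaxSeed (b : List Int) (v a : Int) :
    b.foldl max (max v a) = max v (b.foldl max a) := by
  induction b generalizing v a with
  | nil => simp
  | cons c b ih => simp only [List.foldl_cons, max_assoc, ih]

-- the generalized argmax scan computes "count + first index of the max, if the max beats sofar"
theorem pvArgmax_snd (vals : List Int) (sofar e count : Int) :
    (pvArgmax vals sofar e count).2 =
      match PySem.List.max? vals (fun y => y) with
      | none => e
      | some m =>
        if sofar < m then
          count + (match PySem.List.index? vals m with
                   | some i => (i : Int)
                   | none => 0)
        else e := by
  induction vals generalizing sofar e count with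
  | nil =>
    rw [(PySem.List.max?_eq_none_iff _ _).mpr rfl]
    simp [pvArgmax]
  | cons v t ih =>
    rw [pvArgmax, apply_ite Prod.snd]
    simp only [ih]
    rw [PySem.List.max?_id_cons]
    cases t with
    | nil =>
      rw [(PySem.List.max?_eq_none_iff _ _).mpr rfl]
      simp only [List.foldl_nil]
      by_cases hup : sofar < v
      · simp [hup]
      · simp [hup]
    | cons a b =>
      have hmaxt : PySem.List.max? (a :: b) (fun y => y) = some (b.foldl max a) :=
        PySem.List.max?_id_cons a b
      have hmem : b.foldl max a ∈ a :: b := PySem.List.max?_mem hmaxt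
      obtain ⟨k, hk⟩ := Option.isSome_iff_exists.mp ((PySem.List.index?_isSome_iff _ _).mpr hmem)
      have hfold : (a :: b).foldl max v = max v (b.foldl max a) := by
        simp only [List.foldl_cons]
        exact pvFoldlMaxSeed b v a
      rw [hmaxt, hfold]
      by_cases h2 : v < b.foldl max a
      · have hmx : max v (b.foldl max a) = b.foldl max a := max_eq_right h2.le
        have hne : v ≠ b.foldl max a := ne_of_lt h2
        have hidx : PySem.List.index? (v :: a :: b) (b.foldl max a) = some (k + 1) := by
          rw [PySem.List.index?_cons_of_ne _ hne, hk]
          rfl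
        by_cases hup : sofar < v
        · have h3 : sofar < b.foldl max a := hup.trans h2
          simp only [hmx, hup, h2, h3, hidx, hk, ite_true]
          push_cast
          ring
        · by_cases h3 : sofar < b.foldl max a
          · simp only [hmx, hup, h2, h3, hidx, hk, ite_true, ite_false]
            push_cast
            ring
          · simp only [hmx, hup, h2, h3, ite_false]
      · have hmx : max v (b.foldl max a) = v := max_eq_left (not_lt.mp h2)
        by_cases hup : sofar < v
        · simp only [hmx, hup, h2, PySem.List.index?_cons_self, ite_true, ite_false]
          ring
        · have h3 : ¬ sofar < b.foldl max a :=
            not_lt.mpr ((not_lt.mp h2).trans (not_lt.mp hup))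
          simp only [hmx, hup, h3, ite_false]

-- ===== VERDICT (by name: the statement is the Claim_ definition above) =====
theorem getEndMaximaPoints_spec : Claim_equal_getEndMaximaPoints := by
  intro numbers _
  unfold Spec_getEndMaximaPoints getEndMaximaPoints getEndMaximaPoints_alt
  rw [pvA_foldl_eq, pvB_foldl_eq]
  simp only [List.nil_append]
  rw [pvArgmax_snd]
  cases h : PySem.List.max? (pvBuild numbers 0) (fun y => y) <;> simp [gt_iff_lt]
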